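-- pv_equiv track=rewrite | github.com/ischeinfeld/py_nlp | parameters_class.py | uvs_counts
-- ===== SOURCE A (Python) =====
-- import copy
--
-- def uvs_counts(input_sentences):
-- 	""" Sum c(u,v,s)
--
-- 	if not u in q:
-- 		q[u] = {}
-- 		if not v in q[u]:
-- 			q[u][v] = {}
-- 			q[u][v][s] = ...
-- 	"""
--
-- 	sentences = copy.deepcopy(input_sentences)
--
-- 	for sentence_tags in sentences:
-- 		sentence_tags[1].insert(0, "<START>") # Add buffer tags before tag sequence
-- 		sentence_tags[1].insert(0, "<START>")
-- 		sentence_tags[1].append("<STOP>") # Add stop symbol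
--
--
-- 	q = {}
--
-- 	for i in range(len(sentences)):
-- 		for j in range(2, len(sentences[i][1])): # [1] is for tags, not same # words and tags
--
-- 			u = sentences[i][1][j-2]
-- 			v = sentences[i][1][j-1]
-- 			s = sentences[i][1][j]
--
-- 			if not u in q:
-- 				q[u] = {}
-- 			if not v in q[u]:
-- 				q[u][v] = {}
-- 			if not s in q[u][v]:
-- 				q[u][v][s] = 0
--
-- 			q[u][v][s] += 1
--
-- 	return q
-- ===== SOURCE B (Python) =====
-- def uvs_counts(input_sentences):
--     """Two-pass: flat trigram tally first, then nest it into q[u][v][s]."""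
--     flat = {}
--     for sentence in input_sentences:
--         padded = ["<START>", "<START>"] + sentence[1] + ["<STOP>"]
--         for t in zip(padded, padded[1:], padded[2:]):
--             flat[t] = flat.get(t, 0) + 1
--     q = {}
--     for (u, v, s), c in flat.items():
--         q.setdefault(u, {}).setdefault(v, {})[s] = c
--     return q
-- ===== Notes on version B (the rewrite author's own statement) =====
-- stated objective: alternative
-- what changed: Single pass mutating a deep copy and incrementing a three-level nested dict per trigram is replaced by a two-pass flatten-then-nest scheme: first a flat tally keyed by the (u,v,s) tuple over sliding windows of a locally built padded list (no deepcopy), then a second pass that nests the flat counts into q[u][v][s].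
import Mathlib
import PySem

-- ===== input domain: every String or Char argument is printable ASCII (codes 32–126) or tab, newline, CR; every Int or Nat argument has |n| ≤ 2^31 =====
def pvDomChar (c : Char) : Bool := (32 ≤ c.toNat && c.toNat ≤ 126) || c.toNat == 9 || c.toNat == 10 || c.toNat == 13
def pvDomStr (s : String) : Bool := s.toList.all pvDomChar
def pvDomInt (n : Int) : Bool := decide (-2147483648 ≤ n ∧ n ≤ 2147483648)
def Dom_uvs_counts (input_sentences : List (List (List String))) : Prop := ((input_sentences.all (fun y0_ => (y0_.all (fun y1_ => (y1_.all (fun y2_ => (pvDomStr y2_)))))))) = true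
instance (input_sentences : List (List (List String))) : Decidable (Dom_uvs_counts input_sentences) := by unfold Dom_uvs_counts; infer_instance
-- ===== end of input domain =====

-- B replaces A's deepcopy-and-increment-into-nested-dicts single pass by a two-pass
-- flatten-then-nest scheme (flat trigram tally, then nesting); same asymptotic cost.


-- ===== PORT A =====
-- sentence_tags[1].insert(0,"<START>") twice and .append("<STOP>"), on a deep copy;
-- the [1] accesses are exact under Pre_ (index 1 in range), ported with a [] fallback.
def padA (st : List (List String)) : List (List String) :=
  let tags := PySem.List.pyGetD st 1 []
  let tags := PySem.List.insert tags 0 "<START>"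
  let tags := PySem.List.insert tags 0 "<START>"
  let tags := tags ++ ["<STOP>"]
  st.set 1 tags

-- the if-not-in / zero-init / += 1 body of A's inner loop (Python dict aliasing made explicit)
def bumpA (q : PySem.Dict String (PySem.Dict String (PySem.Dict String Int)))
    (u v s : String) : PySem.Dict String (PySem.Dict String (PySem.Dict String Int)) :=
  let q := if q.contains u then q else q.insert u .empty
  let qu := q.getD u .empty
  let qu := if qu.contains v then qu else qu.insert v .empty
  let quv := qu.getD v .empty
  let quv := if quv.contains s then quv else quv.insert s 0
  q.insert u (qu.insert v (quv.insert s (quv.getD s 0 + 1)))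

-- dict-of-dict-of-dict rendered as nested association lists (the required return type)
def toOut (q : PySem.Dict String (PySem.Dict String (PySem.Dict String Int))) :
    List (String × List (String × List (String × Int))) :=
  q.items.map (fun p => (p.1, p.2.items.map (fun r => (r.1, r.2.items))))

def uvs_counts (input_sentences : List (List (List String))) : List (String × List (String × List (String × Int))) :=
  let sentences := input_sentences.map padA
  let q := (PySem.List.pyRange 0 (PySem.List.len sentences) 1).foldl
    (fun q i =>
      let tags := PySem.List.pyGetD (PySem.List.pyGetD sentences i []) 1 []
      (PySem.List.pyRange 2 (PySem.List.len tags) 1).foldl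
        (fun q j =>
          bumpA q (PySem.List.pyGetD tags (j - 2) "") (PySem.List.pyGetD tags (j - 1) "")
            (PySem.List.pyGetD tags j ""))
        q)
    PySem.Dict.empty
  toOut q

-- ===== PORT B =====
-- zip(padded, padded[1:], padded[2:])
def winsB (l : List String) : List (String × String × String) :=
  List.zip l (List.zip (l.drop 1) (l.drop 2))

def uvs_counts_alt (input_sentences : List (List (List String))) : List (String × List (String × List (String × Int))) :=
  let flat : PySem.Dict (String × String × String) Int := input_sentences.foldl
    (fun flat st =>
      let padded := ["<START>", "<START>"] ++ PySem.List.pyGetD st 1 [] ++ ["<STOP>"]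
      (winsB padded).foldl (fun flat t => flat.insert t (flat.getD t 0 + 1)) flat)
    PySem.Dict.empty
  let q : PySem.Dict String (PySem.Dict String (PySem.Dict String Int)) := flat.items.foldl
    (fun q p =>
      let q := q.setdefault p.1.1 .empty
      let qu := (q.getD p.1.1 .empty).setdefault p.1.2.1 .empty
      let qu := qu.insert p.1.2.1 ((qu.getD p.1.2.1 .empty).insert p.1.2.2 p.2)
      q.insert p.1.1 qu)
    PySem.Dict.empty
  toOut q

-- ===== PRECONDITION & SPEC =====
-- A evaluates sentence_tags[1]; a sentence list with fewer than 2 elements raises IndexError.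
def Pre_uvs_counts (input_sentences : List (List (List String))) : Prop :=
  ∀ st ∈ input_sentences, 2 ≤ st.length
instance (input_sentences : List (List (List String))) : Decidable (Pre_uvs_counts input_sentences) := by unfold Pre_uvs_counts; infer_instance

def pvWitness_uvs_counts : List (List (List String)) := [[["the", "dog"], ["D", "N"]]]

def Spec_uvs_counts (input_sentences : List (List (List String))) (out : List (String × List (String × List (String × Int)))) : Prop := out = uvs_counts_alt input_sentences
instance (input_sentences : List (List (List String))) (out : List (String × List (String × List (String × Int)))) : Decidable (Spec_uvs_counts input_sentences out) := by unfold Spec_uvs_counts; infer_instance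

-- ===== CLAIM (what is proved, stated in full; the proofs are below) =====
def Claim_equal_uvs_counts : Prop := ∀ (input_sentences : List (List (List String))), Dom_uvs_counts input_sentences → Pre_uvs_counts input_sentences → Spec_uvs_counts input_sentences (uvs_counts input_sentences)


-- ===== LEMMAS AND PROOFS =====

-- the padded tag list both programs iterate over (A via the mutated copy, B locally)
def padT (st : List (List String)) : List String :=
  "<START>" :: "<START>" :: PySem.List.pyGetD st 1 [] ++ ["<STOP>"]

-- the stream of trigrams, in traversal order
def triples (input_sentences : List (List (List String))) : List (String × String × String) :=
  input_sentences.flatMap (fun st => winsB (padT st))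

-- canonical nested rendering of a trigram stream (keys in first-occurrence order)
def canon (T : List (String × String × String)) : List (String × List (String × List (String × Int))) :=
  (PySem.Set.ofList (T.map (fun t => t.1))).map (fun u =>
    (u, (PySem.Set.ofList ((T.filter (fun t => t.1 == u)).map (fun t => t.2.1))).map (fun v =>
      (v, (PySem.Set.ofList (((T.filter (fun t => t.1 == u)).filter (fun t => t.2.1 == v)).map (fun t => t.2.2))).map (fun s =>
        (s, ((((T.filter (fun t => t.1 == u)).filter (fun t => t.2.1 == v)).filter (fun t => t.2.2 == s)).length : Int)))))))

-- value of a grouping loop 'd[key x] = g(d.get(key x, d0), x)' at one key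
theorem getD_foldl_modify_gen {kk v b : Type} [BEq kk] [LawfulBEq kk] [DecidableEq kk]
    (l : List b) (key : b -> kk) (d0 : v) (g : v -> b -> v) (d : PySem.Dict kk v) (k : kk) :
    (l.foldl (fun d x => d.modify (key x) d0 (fun y => g y x)) d).getD k d0
      = (l.filter (fun x => key x == k)).foldl g (d.getD k d0) := by
  induction l generalizing d with
  | nil => simp
  | cons x xs ih =>
    simp only [List.foldl_cons, List.filter_cons]
    rw [ih]
    by_cases h : key x = k
    · have hb : (key x == k) = true := beq_iff_eq.mpr h
      rw [hb, if_pos rfl, List.foldl_cons, PySem.Dict.getD_modify, if_pos h.symm, h]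
    · have hb : (key x == k) = false := by simp [h]
      rw [hb, if_neg (by simp), PySem.Dict.getD_modify, if_neg (fun hh => h hh.symm)]

-- items of a grouping loop from the empty dict
theorem items_foldl_modify {kk v b : Type} [BEq kk] [LawfulBEq kk] [DecidableEq kk]
    (l : List b) (key : b -> kk) (d0 : v) (g : v -> b -> v) :
    (l.foldl (fun d x => d.modify (key x) d0 (fun y => g y x)) (PySem.Dict.empty : PySem.Dict kk v)).items
      = (PySem.Set.ofList (l.map key)).map
          (fun k => (k, (l.filter (fun x => key x == k)).foldl g d0)) := by
  have hnd : (l.foldl (fun d x => d.modify (key x) d0 (fun y => g y x)) (PySem.Dict.empty : PySem.Dict kk v)).keys.Nodup :=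
    PySem.Dict.nodup_keys_foldl_modify_key l key d0 (fun _ x y => g y x) PySem.Dict.empty
      (by simp [PySem.Dict.keys_empty])
  have hk : (l.foldl (fun d x => d.modify (key x) d0 (fun y => g y x)) (PySem.Dict.empty : PySem.Dict kk v)).keys = PySem.Set.ofList (l.map key) := by
    have h := PySem.Dict.keys_foldl_modify_key l key d0 (fun _ x y => g y x) (PySem.Dict.empty : PySem.Dict kk v)
    simpa [PySem.Dict.keys_empty, PySem.Set.update_nil_left] using h
  rw [PySem.Dict.items_eq_map_keys _ hnd d0, hk]
  apply List.map_congr_left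
  intro k _
  rw [getD_foldl_modify_gen]
  simp [PySem.Dict.getD_empty]

-- first-occurrence dedup commutes with map (dedup afterwards) and with filter
theorem ofList_map_ofList {a b : Type} [BEq a] [LawfulBEq a] [BEq b] [LawfulBEq b]
    (xs : List a) (f : a -> b) :
    PySem.Set.ofList ((PySem.Set.ofList xs).map f) = PySem.Set.ofList (xs.map f) := by
  induction xs using List.reverseRecOn with
  | nil => rfl
  | append_singleton xs x ih =>
    simp only [List.map_append, List.map_cons, List.map_nil, PySem.Set.ofList_append_singleton]
    by_cases hx : x ∈ PySem.Set.ofList xs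
    · have hfx : f x ∈ PySem.Set.ofList (xs.map f) := by
        rw [PySem.Set.mem_ofList]
        exact List.mem_map_of_mem ((PySem.Set.mem_ofList xs x).mp hx)
      rw [PySem.Set.add_of_mem hx, ih, PySem.Set.add_of_mem hfx]
    · rw [PySem.Set.add_of_not_mem hx, List.map_append, List.map_cons, List.map_nil,
        PySem.Set.ofList_append_singleton, ih]

theorem ofList_filter {a : Type} [BEq a] [LawfulBEq a] (xs : List a) (p : a -> Bool) :
    PySem.Set.ofList (xs.filter p) = (PySem.Set.ofList xs).filter p := by
  induction xs using List.reverseRecOn with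
  | nil => rfl
  | append_singleton xs x ih =>
    rw [List.filter_append, PySem.Set.ofList_append_singleton]
    cases hp : p x
    · simp only [List.filter_cons, hp, List.filter_nil, if_neg Bool.false_ne_true, List.append_nil]
      rw [ih]
      by_cases hx : x ∈ PySem.Set.ofList xs
      · rw [PySem.Set.add_of_mem hx]
      · rw [PySem.Set.add_of_not_mem hx, List.filter_append]
        simp [hp]
    · simp only [List.filter_cons, hp, if_pos trivial, List.filter_nil]
      rw [PySem.Set.ofList_append_singleton]
      by_cases hx : x ∈ PySem.Set.ofList xs
      · have hxf : x ∈ PySem.Set.ofList (xs.filter p) := by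
          rw [PySem.Set.mem_ofList]
          exact List.mem_filter.mpr ⟨(PySem.Set.mem_ofList xs x).mp hx, hp⟩
        rw [PySem.Set.add_of_mem hxf, ih, PySem.Set.add_of_mem hx]
      · have hxf : x ∉ PySem.Set.ofList (xs.filter p) := by
          rw [PySem.Set.mem_ofList]
          intro hmem
          exact hx ((PySem.Set.mem_ofList xs x).mpr (List.mem_filter.mp hmem).1)
        rw [PySem.Set.add_of_not_mem hxf, ih, PySem.Set.add_of_not_mem hx, List.filter_append]
        simp [hp]

-- A's if-not-in / zero-init / += 1 body is a three-level modify
theorem bumpA_eq_modify (q : PySem.Dict String (PySem.Dict String (PySem.Dict String Int))) (u v s : String) :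
    bumpA q u v s
      = q.modify u PySem.Dict.empty (fun qu => qu.modify v PySem.Dict.empty
          (fun quv => quv.modify s 0 (fun n => n + 1))) := by
  unfold bumpA
  simp only [PySem.Dict.modify]
  by_cases hu : q.contains u = true
  · simp only [hu, if_true]
    by_cases hv : (q.getD u PySem.Dict.empty).contains v = true
    · simp only [hv, if_true]
      by_cases hs : ((q.getD u PySem.Dict.empty).getD v PySem.Dict.empty).contains s = true
      · simp [hs]
      · simp [hs, PySem.Dict.getD_insert_self, PySem.Dict.insert_insert_self,
          PySem.Dict.getD_of_not_contains _ _ (by simpa using hs)]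
    · rw [if_neg hv]
      simp [PySem.Dict.getD_insert_self, PySem.Dict.insert_insert_self,
        PySem.Dict.getD_of_not_contains _ _ (by simpa using hv),
        PySem.Dict.contains_empty, PySem.Dict.getD_empty]
  · rw [if_neg hu]
    simp [PySem.Dict.getD_insert_self, PySem.Dict.insert_insert_self,
      PySem.Dict.getD_of_not_contains _ _ (by simpa using hu),
      PySem.Dict.contains_empty, PySem.Dict.getD_empty]

-- B's setdefault-chain body is a two-level modify ending in an insert
theorem stepB_eq_modify (q : PySem.Dict String (PySem.Dict String (PySem.Dict String Int)))
    (p : (String × String × String) × Int) :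
    (let q1 := q.setdefault p.1.1 .empty
     let qu := (q1.getD p.1.1 .empty).setdefault p.1.2.1 .empty
     let qu := qu.insert p.1.2.1 ((qu.getD p.1.2.1 .empty).insert p.1.2.2 p.2)
     q1.insert p.1.1 qu)
      = q.modify p.1.1 PySem.Dict.empty (fun qu => qu.modify p.1.2.1 PySem.Dict.empty
          (fun quv => quv.insert p.1.2.2 p.2)) := by
  simp only [PySem.Dict.modify]
  by_cases hu : q.contains p.1.1 = true
  · rw [PySem.Dict.setdefault_of_contains _ _ hu]
    by_cases hv : (q.getD p.1.1 PySem.Dict.empty).contains p.1.2.1 = true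
    · rw [PySem.Dict.setdefault_of_contains _ _ hv]
    · rw [PySem.Dict.setdefault_of_not_contains _ _ (by simpa using hv)]
      simp [PySem.Dict.getD_insert_self, PySem.Dict.insert_insert_self,
        PySem.Dict.getD_of_not_contains _ _ (by simpa using hv)]
  · rw [PySem.Dict.setdefault_of_not_contains _ _ (by simpa using hu)]
    simp [PySem.Dict.getD_insert_self, PySem.Dict.insert_insert_self,
      PySem.Dict.getD_of_not_contains _ _ (by simpa using hu),
      PySem.Dict.contains_empty, PySem.Dict.getD_empty,
      PySem.Dict.setdefault_of_not_contains _ _ (PySem.Dict.contains_empty _)]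

-- A's index loop over range(2, len(l)) reads exactly the sliding windows of l
theorem map_range_winsB (l : List String) :
    (PySem.List.pyRange 2 (PySem.List.len l)).map
        (fun j => (PySem.List.pyGetD l (j - 2) "", PySem.List.pyGetD l (j - 1) "", PySem.List.pyGetD l j ""))
      = winsB l := by
  apply List.ext_getElem
  · simp [PySem.List.length_pyRange_one, winsB, List.length_zip, PySem.List.len_eq]
    omega
  · intro k h1 h2
    simp only [List.getElem_map, PySem.List.getElem_pyRange_one, winsB, List.getElem_zip,
      List.getElem_drop]
    have e1 : (2 : Int) + (k : Int) - 2 = ((k : Nat) : Int) := by omega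
    have e2 : (2 : Int) + (k : Int) - 1 = ((1 + k : Nat) : Int) := by push_cast; omega
    have e3 : (2 : Int) + (k : Int) = ((2 + k : Nat) : Int) := by push_cast; omega
    rw [e1, e2, e3, PySem.List.pyGetD_natCast, PySem.List.pyGetD_natCast, PySem.List.pyGetD_natCast]
    have hl : k + 2 < l.length := by
      simp [PySem.List.length_pyRange_one, PySem.List.len_eq] at h1
      omega
    rw [List.getD_eq_getElem l "" (by omega), List.getD_eq_getElem l "" (by omega),
      List.getD_eq_getElem l "" (by omega)]

theorem foldl_range_triples {g : Type} (l : List String) (f : g -> String -> String -> String -> g) (q : g) :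
    (PySem.List.pyRange 2 (PySem.List.len l)).foldl
        (fun q j => f q (PySem.List.pyGetD l (j - 2) "") (PySem.List.pyGetD l (j - 1) "") (PySem.List.pyGetD l j "")) q
      = (winsB l).foldl (fun q t => f q t.1 t.2.1 t.2.2) q := by
  rw [← map_range_winsB l, List.foldl_map]

-- under Pre_, the tag list A reads back from the padded copy is padT
theorem padA_get (st : List (List String)) (h : 2 <= st.length) :
    PySem.List.pyGetD (padA st) 1 [] = padT st := by
  simp only [padA, padT, PySem.List.insert_zero]
  rw [PySem.List.pyGetD_ofNat']
  have hlen : 1 < st.length := by omega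
  simp [List.getD_eq_getElem?_getD, List.getElem?_set, hlen]

-- counting loop as length
theorem foldl_count_len (l : List (String × String × String)) :
    l.foldl (fun (n : Int) _ => n + 1) 0 = (l.length : Int) := by
  suffices h : ∀ a : Int, l.foldl (fun n _ => n + 1) a = a + (l.length : Int) by
    simpa using h 0
  induction l with
  | nil => simp
  | cons x xs ih =>
    intro a
    simp only [List.foldl_cons, List.length_cons, ih]
    push_cast
    ring

-- third components are distinct within one (u,v) group of a dedup'd trigram list
theorem nodup_third (T : List (String × String × String)) (u v : String) :
    ((((PySem.Set.ofList T).filter (fun t => t.1 == u)).filter (fun t => t.2.1 == v)).map (fun t => t.2.2)).Nodup := by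
  apply List.Nodup.map_on
  · intro x hx y hy hxy
    have hx2 : x.2.1 == v := (List.mem_filter.mp hx).2
    have hx1 : x.1 == u := (List.mem_filter.mp (List.mem_filter.mp hx).1).2
    have hy2 : y.2.1 == v := (List.mem_filter.mp hy).2
    have hy1 : y.1 == u := (List.mem_filter.mp (List.mem_filter.mp hy).1).2
    obtain ⟨xa, xb, xc⟩ := x
    obtain ⟨ya, yb, yc⟩ := y
    simp_all
  · exact (((PySem.Set.nodup_ofList T).filter _).filter _)

-- count of a trigram equals the length of the three-fold filter
theorem count_eq_len3 (T : List (String × String × String)) (u v : String)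
    (t : String × String × String) (h1 : t.1 = u) (h2 : t.2.1 = v) :
    (((T.filter (fun t => t.1 == u)).filter (fun t => t.2.1 == v)).filter (fun r => r.2.2 == t.2.2)).length
      = T.count t := by
  rw [← List.countP_eq_length_filter, List.countP_filter, List.countP_filter,
    List.count_eq_countP]
  apply List.countP_congr
  intro r _
  obtain ⟨t1, t2, t3⟩ := t
  obtain ⟨r1, r2, r3⟩ := r
  simp only at h1 h2
  subst h1 h2
  rw [Bool.eq_iff_iff]
  simp only [Bool.and_eq_true, beq_iff_eq, Prod.mk.injEq]
  tauto

-- a fold of inserts over fresh distinct keys lists its pairs in order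
theorem items_insert_fold (F : List (String × String × String))
    (hnd : (F.map (fun t => t.2.2)).Nodup) (cnt : (String × String × String) → Int) :
    ((F.map (fun t => (t, cnt t))).foldl (fun quv p => quv.insert p.1.2.2 p.2) PySem.Dict.empty).items
      = F.map (fun t => (t.2.2, cnt t)) := by
  have h := PySem.Dict.items_foldl_insert_fresh (F.map (fun t => (t, cnt t)))
    (fun p => p.1.2.2) (fun p => p.2) PySem.Dict.empty
    (by intro a _; exact PySem.Dict.contains_empty _)
    (by simpa [List.map_map] using hnd)
  simpa [List.map_map, PySem.Dict.empty] using h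

-- A's fold of three-level modifies renders as canon
theorem lemA (T : List (String × String × String)) :
    toOut (T.foldl (fun q t => q.modify t.1 PySem.Dict.empty (fun qu => qu.modify t.2.1 PySem.Dict.empty
        (fun quv => quv.modify t.2.2 0 (fun n => n + 1)))) PySem.Dict.empty) = canon T := by
  unfold toOut canon
  have h1 : (T.foldl (fun q t => q.modify t.1 PySem.Dict.empty (fun qu => qu.modify t.2.1 PySem.Dict.empty
        (fun quv => quv.modify t.2.2 0 (fun n => n + 1))))
        (PySem.Dict.empty : PySem.Dict String (PySem.Dict String (PySem.Dict String Int)))).items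
      = (PySem.Set.ofList (T.map (fun t => t.1))).map
          (fun u => (u, (T.filter (fun t => t.1 == u)).foldl
            (fun qu t => qu.modify t.2.1 PySem.Dict.empty (fun quv => quv.modify t.2.2 0 (fun n => n + 1)))
            (PySem.Dict.empty : PySem.Dict String (PySem.Dict String Int)))) :=
    items_foldl_modify T (fun t => t.1) PySem.Dict.empty _
  simp only [h1, List.map_map]
  apply List.map_congr_left
  intro u _
  simp only [Function.comp_apply]
  refine congrArg (Prod.mk u) ?_
  have h2 : ((T.filter (fun t => t.1 == u)).foldl
        (fun qu t => qu.modify t.2.1 PySem.Dict.empty (fun quv => quv.modify t.2.2 0 (fun n => n + 1)))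
        (PySem.Dict.empty : PySem.Dict String (PySem.Dict String Int))).items
      = (PySem.Set.ofList ((T.filter (fun t => t.1 == u)).map (fun t => t.2.1))).map
          (fun v => (v, ((T.filter (fun t => t.1 == u)).filter (fun t => t.2.1 == v)).foldl
            (fun quv t => quv.modify t.2.2 0 (fun n => n + 1))
            (PySem.Dict.empty : PySem.Dict String Int))) :=
    items_foldl_modify (T.filter (fun t => t.1 == u)) (fun t : String × String × String => t.2.1) PySem.Dict.empty
      (fun quv (t : String × String × String) => quv.modify t.2.2 0 (fun n => n + 1))
  simp only [h2, List.map_map]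
  apply List.map_congr_left
  intro v _
  simp only [Function.comp_apply]
  refine congrArg (Prod.mk v) ?_
  have h3 : (((T.filter (fun t => t.1 == u)).filter (fun t => t.2.1 == v)).foldl
        (fun quv t => quv.modify t.2.2 0 (fun n => n + 1))
        (PySem.Dict.empty : PySem.Dict String Int)).items
      = (PySem.Set.ofList (((T.filter (fun t => t.1 == u)).filter (fun t => t.2.1 == v)).map (fun t => t.2.2))).map
          (fun s => (s, (((T.filter (fun t => t.1 == u)).filter (fun t => t.2.1 == v)).filter
            (fun t => t.2.2 == s)).foldl (fun (n : Int) _ => n + 1) 0)) :=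
    items_foldl_modify ((T.filter (fun t => t.1 == u)).filter (fun t => t.2.1 == v))
      (fun t : String × String × String => t.2.2) (0 : Int) (fun (n : Int) _ => n + 1)
  simp only [h3]
  apply List.map_congr_left
  intro s _
  refine congrArg (Prod.mk s) ?_
  exact foldl_count_len _

-- B's nesting of the flat counter renders as canon too
theorem lemB (T : List (String × String × String)) :
    toOut ((PySem.Dict.counter T).items.foldl (fun q p => q.modify p.1.1 PySem.Dict.empty
        (fun qu => qu.modify p.1.2.1 PySem.Dict.empty (fun quv => quv.insert p.1.2.2 p.2))) PySem.Dict.empty)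
      = canon T := by
  unfold toOut canon
  have h1 : ((PySem.Dict.counter T).items.foldl (fun q p => q.modify p.1.1 PySem.Dict.empty
        (fun qu => qu.modify p.1.2.1 PySem.Dict.empty (fun quv => quv.insert p.1.2.2 p.2))) PySem.Dict.empty).items
      = (PySem.Set.ofList ((PySem.Dict.counter T).items.map (fun p => p.1.1))).map
          (fun u => (u, ((PySem.Dict.counter T).items.filter (fun p => p.1.1 == u)).foldl
            (fun qu p => qu.modify p.1.2.1 PySem.Dict.empty (fun quv => quv.insert p.1.2.2 p.2))
            PySem.Dict.empty)) :=
    items_foldl_modify ((PySem.Dict.counter T).items)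
      (fun p : (String × String × String) × Int => p.1.1) PySem.Dict.empty
      (fun qu (p : (String × String × String) × Int) =>
        qu.modify p.1.2.1 PySem.Dict.empty (fun quv => quv.insert p.1.2.2 p.2))
  simp only [h1, List.map_map]
  simp only [PySem.Dict.items_counter, List.map_map, List.filter_map, Function.comp]
  rw [ofList_map_ofList]
  apply List.map_congr_left
  intro u _
  simp only [Function.comp_apply]
  refine congrArg (Prod.mk u) ?_
  simp only [Function.comp_def]
  have h2 : ((((PySem.Set.ofList T).filter (fun t => t.1 == u)).map
        (fun k => (k, (List.count k T : Int)))).foldl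
        (fun qu p => qu.modify p.1.2.1 PySem.Dict.empty (fun quv => quv.insert p.1.2.2 p.2))
        (PySem.Dict.empty : PySem.Dict String (PySem.Dict String Int))).items
      = (PySem.Set.ofList ((((PySem.Set.ofList T).filter (fun t => t.1 == u)).map
          (fun k => (k, (List.count k T : Int)))).map (fun p => p.1.2.1))).map
          (fun v => (v, ((((PySem.Set.ofList T).filter (fun t => t.1 == u)).map
            (fun k => (k, (List.count k T : Int)))).filter (fun p => p.1.2.1 == v)).foldl
            (fun quv p => quv.insert p.1.2.2 p.2)
            (PySem.Dict.empty : PySem.Dict String Int))) :=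
    items_foldl_modify (((PySem.Set.ofList T).filter (fun t => t.1 == u)).map
        (fun k => (k, (List.count k T : Int))))
      (fun p : (String × String × String) × Int => p.1.2.1) PySem.Dict.empty
      (fun quv (p : (String × String × String) × Int) => quv.insert p.1.2.2 p.2)
  simp only [h2, List.map_map, List.filter_map, Function.comp_def]
  simp only [← ofList_filter]
  rw [ofList_map_ofList]
  apply List.map_congr_left
  intro v _
  refine congrArg (Prod.mk v) ?_
  have hnd := nodup_third T u v
  simp only [← ofList_filter] at hnd
  have h3 := items_insert_fold (PySem.Set.ofList ((T.filter (fun t => t.1 == u)).filter (fun t => t.2.1 == v)))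
    hnd (fun t => (List.count t T : Int))
  simp only [h3]
  rw [← ofList_map_ofList, PySem.Set.ofList_eq_self_of_nodup _ hnd, List.map_map]
  apply List.map_congr_left
  intro t ht
  simp only [Function.comp_apply]
  refine congrArg (Prod.mk t.2.2) ?_
  have htF : t ∈ (T.filter (fun t => t.1 == u)).filter (fun t => t.2.1 == v) :=
    (PySem.Set.mem_ofList _ _).mp ht
  have h2v : t.2.1 = v := by simpa using (List.mem_filter.mp htF).2
  have h1u : t.1 = u := by simpa using (List.mem_filter.mp (List.mem_filter.mp htF).1).2
  have hc := count_eq_len3 T u v t h1u h2v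
  exact_mod_cast congrArg (Nat.cast : Nat → Int) hc.symm

theorem lemA_top (input_sentences : List (List (List String))) (hpre : Pre_uvs_counts input_sentences) :
    uvs_counts input_sentences = canon (triples input_sentences) := by
  simp only [uvs_counts]
  have hstep : (PySem.List.pyRange 0 (PySem.List.len (input_sentences.map padA))).foldl
      (fun q i =>
        (PySem.List.pyRange 2 (PySem.List.len (PySem.List.pyGetD (PySem.List.pyGetD (input_sentences.map padA) i []) 1 []))).foldl
          (fun q j => bumpA q
            (PySem.List.pyGetD (PySem.List.pyGetD (PySem.List.pyGetD (input_sentences.map padA) i []) 1 []) (j - 2) "")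
            (PySem.List.pyGetD (PySem.List.pyGetD (PySem.List.pyGetD (input_sentences.map padA) i []) 1 []) (j - 1) "")
            (PySem.List.pyGetD (PySem.List.pyGetD (PySem.List.pyGetD (input_sentences.map padA) i []) 1 []) j "")) q)
      PySem.Dict.empty
      = (input_sentences.map padA).foldl
        (fun q st => (PySem.List.pyRange 2 (PySem.List.len (PySem.List.pyGetD st 1 []))).foldl
          (fun q j => bumpA q (PySem.List.pyGetD (PySem.List.pyGetD st 1 []) (j - 2) "")
            (PySem.List.pyGetD (PySem.List.pyGetD st 1 []) (j - 1) "")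
            (PySem.List.pyGetD (PySem.List.pyGetD st 1 []) j "")) q)
        PySem.Dict.empty :=
    PySem.List.foldl_pyRange_zero_pyGetD (input_sentences.map padA) []
      (fun q st => (PySem.List.pyRange 2 (PySem.List.len (PySem.List.pyGetD st 1 []))).foldl
        (fun q j => bumpA q (PySem.List.pyGetD (PySem.List.pyGetD st 1 []) (j - 2) "")
          (PySem.List.pyGetD (PySem.List.pyGetD st 1 []) (j - 1) "")
          (PySem.List.pyGetD (PySem.List.pyGetD st 1 []) j "")) q)
      PySem.Dict.empty
  simp only [hstep, List.foldl_map]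
  refine Eq.trans (congrArg toOut ?_) (lemA (triples input_sentences))
  unfold triples
  rw [List.foldl_flatMap]
  apply PySem.List.foldl_congr_mem
  intro acc st hst
  simp only [padA_get st (hpre st hst)]
  rw [foldl_range_triples (padT st) bumpA]
  simp only [bumpA_eq_modify]

theorem lemB_top (input_sentences : List (List (List String))) :
    uvs_counts_alt input_sentences = canon (triples input_sentences) := by
  simp only [uvs_counts_alt]
  refine Eq.trans (congrArg toOut ?_) (lemB (triples input_sentences))
  have hflat : input_sentences.foldl
      (fun flat st => (winsB (["<START>", "<START>"] ++ PySem.List.pyGetD st 1 [] ++ ["<STOP>"])).foldl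
        (fun flat t => flat.insert t (flat.getD t 0 + 1)) flat) PySem.Dict.empty
      = PySem.Dict.counter (triples input_sentences) := by
    rw [← PySem.Dict.foldl_insert_getD_add_one_eq_counter]
    unfold triples
    rw [List.foldl_flatMap]
    rfl
  rw [hflat]
  apply PySem.List.foldl_congr_mem
  intro acc p _
  rw [stepB_eq_modify]

-- ===== VERDICT (by name: the statement is the Claim_ definition above) =====
theorem uvs_counts_spec : Claim_equal_uvs_counts := by
  intro input hdom hpre
  unfold Spec_uvs_counts
  rw [lemA_top input hpre, lemB_top input]
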